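-- pv_equiv track=rewrite | github.com/FelixBaastadBerg/RL-project | Code/visualize_trace.py | calculate_time_without_tree
-- ===== SOURCE A (Python) =====
-- def calculate_time_without_tree(tree_in_proximity):
--     """
--     Calculate the number of consecutive timesteps without seeing a tree.
--
--     Args:
--         tree_in_proximity (list): Boolean list indicating if a tree is in proximity.
--
--     Returns:
--         list: List of integers representing time since last tree was seen.
--     """
--     time_without_tree = []
--     counter = 0
--
--     for is_tree_near in tree_in_proximity:
--         if is_tree_near:
--             counter = 0  # Reset the counter when a tree is seen
--         else:
--             counter += 1  # Increment the counter if no tree is seen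
--         time_without_tree.append(counter)
--
--     return time_without_tree
-- ===== SOURCE B (Python) =====
-- from itertools import groupby
--
-- def calculate_time_without_tree(tree_in_proximity):
--     out = []
--     for key, group in groupby(tree_in_proximity, key=bool):
--         n = sum(1 for _ in group)
--         if key:
--             out.extend([0] * n)
--         else:
--             out.extend(range(1, n + 1))
--     return out
-- ===== Notes on version B (the rewrite author's own statement) =====
-- stated objective: alternative
-- what changed: B splits the input into maximal runs of equal truthiness with itertools.groupby and emits a whole block per run ([0]*n for a tree run, range(1,n+1) for a gap run), instead of A's element-by-element update of a single running counter.
import Mathlib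
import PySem

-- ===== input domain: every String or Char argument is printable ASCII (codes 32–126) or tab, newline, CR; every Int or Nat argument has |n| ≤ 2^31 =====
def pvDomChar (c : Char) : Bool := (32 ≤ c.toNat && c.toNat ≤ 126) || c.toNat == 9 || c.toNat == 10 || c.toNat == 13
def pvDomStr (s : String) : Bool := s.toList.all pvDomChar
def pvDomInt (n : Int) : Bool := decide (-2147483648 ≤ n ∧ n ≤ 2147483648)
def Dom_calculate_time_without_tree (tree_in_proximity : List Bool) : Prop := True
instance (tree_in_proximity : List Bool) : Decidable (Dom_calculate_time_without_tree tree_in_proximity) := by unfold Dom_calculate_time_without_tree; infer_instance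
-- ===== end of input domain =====

-- B re-implements A by splitting the input into maximal runs (groupby) and emitting a block per run; same O(n) cost, different decomposition.

-- ===== PORT A =====
-- A: one pass with a running counter, appending the counter after each element.
def calculate_time_without_tree (tree_in_proximity : List Bool) : List Int :=
  (tree_in_proximity.foldl
    (fun (s : Int × List Int) is_tree_near =>
      let counter := if is_tree_near then 0 else s.1 + 1
      (counter, s.2 ++ [counter]))
    ((0 : Int), ([] : List Int))).2

-- ===== PORT B =====
-- the block emitted for one maximal run: [0]*n for a tree run, range(1,n+1) for a gap run
def pvRunBlock (key : Bool) (n : Nat) : List Int :=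
  if key then List.replicate n 0
  else (List.range n).map (fun i : Nat => ((i : Nat) : Int) + 1)

-- groupby: peel one maximal run of elements equal to the head, emit its block, recurse
def pvGroups : List Bool → List Int
  | [] => []
  | b :: t =>
    pvRunBlock b (t.takeWhile (· = b)).length.succ ++ pvGroups (t.dropWhile (· = b))
termination_by l => l.length
decreasing_by
  simp only [List.length_cons]
  exact Nat.lt_succ_of_le (List.length_dropWhile_le _ _)

def calculate_time_without_tree_alt (tree_in_proximity : List Bool) : List Int :=
  pvGroups tree_in_proximity

-- ===== PRECONDITION & SPEC =====
def Spec_calculate_time_without_tree (tree_in_proximity : List Bool) (out : List Int) : Prop := out = calculate_time_without_tree_alt tree_in_proximity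
instance (tree_in_proximity : List Bool) (out : List Int) : Decidable (Spec_calculate_time_without_tree tree_in_proximity out) := by unfold Spec_calculate_time_without_tree; infer_instance

-- ===== CLAIM (what is proved, stated in full; the proofs are below) =====
def Claim_equal_calculate_time_without_tree : Prop := ∀ (tree_in_proximity : List Bool), Dom_calculate_time_without_tree tree_in_proximity → Spec_calculate_time_without_tree tree_in_proximity (calculate_time_without_tree tree_in_proximity)

-- ===== LEMMAS AND PROOFS =====

-- element-wise counter recursion characterising A
def pvCount : Int → List Bool → List Int
  | _, [] => []
  | c, b :: t =>
    let c' := if b then 0 else c + 1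
    c' :: pvCount c' t

theorem pvFoldl_eq (l : List Bool) : ∀ (c : Int) (acc : List Int),
    (l.foldl (fun (s : Int × List Int) b =>
        let counter := if b then 0 else s.1 + 1
        (counter, s.2 ++ [counter])) (c, acc)).2 = acc ++ pvCount c l := by
  induction l with
  | nil => intro c acc; simp [pvCount]
  | cons b t ih => intro c acc; simp [List.foldl, pvCount, ih]

theorem pvA_eq (l : List Bool) : calculate_time_without_tree l = pvCount 0 l := by
  simpa using pvFoldl_eq l 0 []

-- a nonempty run of trues emits zeros, regardless of the incoming counter
theorem pvCount_trues (r : List Bool) (h : ∀ x ∈ r, x = true) :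
    ∀ (c : Int) (t : List Bool),
    pvCount c (true :: (r ++ t)) = List.replicate (r.length + 1) 0 ++ pvCount 0 t := by
  induction r with
  | nil => intro c t; simp [pvCount]
  | cons b r ih =>
    intro c t
    have hb : b = true := h b (by simp)
    subst hb
    have ih' := ih (fun x hx => h x (by simp [hx])) 0 t
    simp [pvCount, List.replicate_succ] at ih' ⊢
    exact ih'

-- cons step of a gap run: shifting the counter shifts the emitted block
theorem pvRangeShift (c : Int) (n : Nat) :
    (List.range (n + 1)).map (fun i : Nat => c + (i : Int) + 1)
      = (c + 1) :: (List.range n).map (fun i : Nat => (c + 1) + (i : Int) + 1) := by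
  rw [List.range_succ_eq_map, List.map_cons, List.map_map]
  refine congrArg₂ _ (by norm_num) ?_
  exact List.map_congr_left (fun i _ => by
    simp only [Function.comp, Nat.succ_eq_add_one]; push_cast; ring)

-- a nonempty run of falses followed by nothing or a true emits c+1, …, c+n
theorem pvCount_falses (r : List Bool) (h : ∀ x ∈ r, x = false) :
    ∀ (c : Int) (t : List Bool), (t = [] ∨ ∃ t', t = true :: t') →
    pvCount c (false :: (r ++ t))
      = (List.range (r.length + 1)).map (fun i : Nat => c + (i : Int) + 1) ++ pvCount 0 t := by
  induction r with
  | nil =>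
    intro c t ht
    rcases ht with rfl | ⟨t', rfl⟩
    · simp [pvCount]
    · simp [pvCount]
  | cons b r ih =>
    intro c t ht
    have hb : b = false := h b (by simp)
    subst hb
    have ih' := ih (fun x hx => h x (by simp [hx])) (c + 1) t ht
    simp only [List.cons_append, pvCount,
      if_neg (by simp : ¬ ((false : Bool) = true))] at ih' ⊢
    rw [List.length_cons, pvRangeShift]
    simp only [List.cons_append]
    exact congrArg (List.cons (c + 1)) ih'

theorem pvGroups_eq (n : Nat) : ∀ (l : List Bool), l.length ≤ n → pvCount 0 l = pvGroups l := by
  induction n with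
  | zero =>
    intro l hl
    have : l = [] := List.eq_nil_of_length_eq_zero (Nat.le_zero.mp hl)
    subst this; simp [pvCount, pvGroups]
  | succ n ih =>
    intro l hl
    match l with
    | [] => simp [pvCount, pvGroups]
    | b :: t =>
      rw [pvGroups]
      set r := t.takeWhile (· = b) with hr
      set rest := t.dropWhile (· = b) with hrest
      have hsplit : t = r ++ rest := by
        rw [hr, hrest, List.takeWhile_append_dropWhile]
      have hrall : ∀ x ∈ r, x = b := by
        intro x hx
        rw [hr] at hx
        simpa using List.mem_takeWhile_imp hx
      have hrestlen : rest.length ≤ n := by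
        have h1 := List.length_dropWhile_le (fun x => decide (x = b)) t
        rw [← hrest] at h1
        have h2 : t.length ≤ n := by simpa using hl
        omega
      have hrec : pvCount 0 rest = pvGroups rest := ih rest hrestlen
      have hresthead : rest = [] ∨ ∃ t', rest = (!b) :: t' := by
        cases hne : rest with
        | nil => exact Or.inl rfl
        | cons x t' =>
          right
          have hne' : t.dropWhile (fun y => decide (y = b)) = x :: t' := by
            rw [← hrest]; exact hne
          have hx := List.head_dropWhile_not (fun y => decide (y = b)) (l := t)
            (by simp [hne'])
          simp only [hne', List.head_cons, decide_eq_false_iff_not] at hx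
          exact ⟨t', by cases x <;> cases b <;> first | rfl | exact absurd rfl hx⟩
      rw [hsplit]
      cases b with
      | true =>
        rw [pvCount_trues r hrall 0 rest, hrec, pvRunBlock]
        simp [Nat.succ_eq_add_one]
      | false =>
        have hh : rest = [] ∨ ∃ t', rest = true :: t' := by simpa using hresthead
        rw [pvCount_falses r hrall 0 rest hh, hrec, pvRunBlock]
        simp only [if_neg (by simp : ¬ ((false : Bool) = true)), Nat.succ_eq_add_one]
        congr 1
        exact List.map_congr_left (fun i _ => by ring)

-- ===== VERDICT (by name: the statement is the Claim_ definition above) =====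
theorem calculate_time_without_tree_spec : Claim_equal_calculate_time_without_tree := by
  intro l _
  show calculate_time_without_tree l = calculate_time_without_tree_alt l
  rw [pvA_eq, calculate_time_without_tree_alt, pvGroups_eq l.length l (le_refl _)]
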